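-- pv_equiv track=rewrite | github.com/bkrayfield/TBHRP | Summer2023_Remake/classhrp.py | find_max_negative_index
-- ===== SOURCE A (Python) =====
-- def find_max_negative_index(lst):
--     max_index = None
--     max_value = float('-inf')  # Initialize with negative infinity
--
--     for i, num in enumerate(lst):
--         if num <= 0 and num > max_value:
--             max_index = i
--             max_value = num
--
--     return max_index
-- ===== SOURCE B (Python) =====
-- def find_max_negative_index(lst):
--     cands = [p for p in enumerate(lst) if p[1] <= 0]
--     if not cands:
--         return None
--     return max(cands, key=lambda p: p[1])[0]
-- ===== Notes on version B (the rewrite author's own statement) =====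
-- stated objective: simpler
-- what changed: Replaces the fused index/value accumulator loop (with a float('-inf') sentinel) by a filter of the non-positive (index, value) pairs followed by a library max-by-key reduction, whose first-maximal rule gives the same first-occurrence tie-breaking.
import Mathlib
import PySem

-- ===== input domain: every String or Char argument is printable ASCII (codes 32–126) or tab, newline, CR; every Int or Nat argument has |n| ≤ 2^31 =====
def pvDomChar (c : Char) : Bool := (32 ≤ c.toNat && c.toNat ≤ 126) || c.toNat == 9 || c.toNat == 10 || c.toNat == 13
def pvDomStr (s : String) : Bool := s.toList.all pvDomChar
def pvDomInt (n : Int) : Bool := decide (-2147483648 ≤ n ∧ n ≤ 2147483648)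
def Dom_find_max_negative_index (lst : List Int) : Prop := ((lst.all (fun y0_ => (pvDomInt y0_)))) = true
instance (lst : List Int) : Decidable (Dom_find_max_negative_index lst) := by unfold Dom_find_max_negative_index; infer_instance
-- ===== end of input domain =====

-- B replaces A's fused index/value accumulator loop by a filter of the non-positive
-- (index, value) pairs followed by a max-by-key reduction (objective: simpler).


-- ===== PORT A =====
-- state = (max_index, max_value); max_value is Option Int with none = float('-inf'),
-- so 'num > max_value' is 's.2.all (· < num)' (vacuously true at -inf); exact, as all
-- updates store ints and -inf is below every int.
def find_max_negative_index (lst : List Int) : Option Int :=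
  ((PySem.List.enumerate lst 0).foldl
    (fun (s : Option Int × Option Int) (p : Int × Int) =>
      if p.2 ≤ 0 ∧ s.2.all (· < p.2) then (some p.1, some p.2) else s)
    (none, none)).1

-- ===== PORT B =====
def find_max_negative_index_alt (lst : List Int) : Option Int :=
  let cands := (PySem.List.enumerate lst 0).filter (fun p => p.2 ≤ 0)
  (PySem.List.max? cands (fun p => p.2)).map (·.1)

-- ===== PRECONDITION & SPEC =====
def Spec_find_max_negative_index (lst : List Int) (out : Option Int) : Prop := out = find_max_negative_index_alt lst
instance (lst : List Int) (out : Option Int) : Decidable (Spec_find_max_negative_index lst out) := by unfold Spec_find_max_negative_index; infer_instance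

-- ===== CLAIM (what is proved, stated in full; the proofs are below) =====
def Claim_equal_find_max_negative_index : Prop := ∀ (lst : List Int), Dom_find_max_negative_index lst → Spec_find_max_negative_index lst (find_max_negative_index lst)

-- ===== LEMMAS AND PROOFS =====

-- A's loop, started from a state mirroring m, computes the first-maximal reduction of the
-- filtered list started from m (componentwise projections of the same optional pair).
lemma fmni_fold_eq (l : List (Int × Int)) (m : Option (Int × Int)) :
    l.foldl
      (fun (s : Option Int × Option Int) (p : Int × Int) =>
        if p.2 ≤ 0 ∧ s.2.all (· < p.2) then (some p.1, some p.2) else s)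
      (m.map (·.1), m.map (·.2))
    = (let r := (l.filter (fun p => decide (p.2 ≤ 0))).foldl
        (fun acc x => match acc with
          | none => some x
          | some q => if q.2 < x.2 then some x else some q) m
       ((r.map (·.1), r.map (·.2)))) := by
  induction l generalizing m with
  | nil => rfl
  | cons p t ih =>
    simp only [List.foldl_cons, List.filter_cons]
    by_cases hp : p.2 ≤ 0
    · cases m with
      | none =>
        simpa [hp] using ih (some p)
      | some q =>
        by_cases hq : q.2 < p.2
        · simpa [hp, hq] using ih (some p)
        · simpa [hp, hq] using ih (some q)
    · simpa [hp] using ih m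

-- ===== VERDICT (by name: the statement is the Claim_ definition above) =====
theorem find_max_negative_index_spec : Claim_equal_find_max_negative_index := by
  intro lst _
  unfold Spec_find_max_negative_index find_max_negative_index find_max_negative_index_alt
  have h := fmni_fold_eq (PySem.List.enumerate lst 0) none
  simp only [Option.map_none] at h
  rw [h]
  simp only [PySem.List.max?]
  congr 1
  congr 1
  funext acc x
  cases acc <;> simp
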